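-- pv_equiv track=rewrite | github.com/vannovich/Python-Development | Day003/love_calculator.py | true_and_love_test
-- ===== SOURCE A (Python) =====
-- def true_and_love_test(name):
--     countLove = 0
--     countTrue = 0
--     for i in name.lower():
--         if i in 'love':
--             countLove+=1
--         if i in 'true':
--             countTrue+=1
--     count = f"{countTrue}{countLove}"
--     return int(count)
-- ===== SOURCE B (Python) =====
-- def true_and_love_test(name):
--     freq = {}
--     for ch in name.lower():
--         freq[ch] = freq.get(ch, 0) + 1
--     countTrue = sum(freq.get(ch, 0) for ch in 'true')
--     countLove = sum(freq.get(ch, 0) for ch in 'love')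
--     return int(f"{countTrue}{countLove}")
-- ===== Notes on version B (the rewrite author's own statement) =====
-- stated objective: alternative
-- what changed: B builds a character-frequency dict in one pass and then sums lookups over the fixed letter strings 'true' and 'love', instead of testing each character for membership in both strings inside the scan.
import Mathlib
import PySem

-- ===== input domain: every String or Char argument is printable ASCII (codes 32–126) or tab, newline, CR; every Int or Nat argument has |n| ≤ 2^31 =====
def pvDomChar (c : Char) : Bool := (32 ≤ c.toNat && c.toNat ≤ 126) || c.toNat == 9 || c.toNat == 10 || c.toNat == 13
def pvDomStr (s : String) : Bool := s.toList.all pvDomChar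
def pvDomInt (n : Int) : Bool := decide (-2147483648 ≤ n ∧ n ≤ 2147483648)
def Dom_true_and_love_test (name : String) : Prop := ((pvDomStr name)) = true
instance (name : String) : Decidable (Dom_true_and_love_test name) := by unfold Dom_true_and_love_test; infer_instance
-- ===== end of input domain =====

-- B builds a character-frequency dict once, then sums lookups over the fixed strings
-- 'true' and 'love' instead of membership-testing every character of the name twice.

-- ===== PORT A =====
def true_and_love_test (name : String) : Int :=
  let p := (PySem.Str.lower name).toList.foldl
    (fun (st : Int × Int) i =>
      let st := if "love".toList.contains i then (st.1 + 1, st.2) else st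
      if "true".toList.contains i then (st.1, st.2 + 1) else st)
    ((0 : Int), (0 : Int))
  -- int(f"{countTrue}{countLove}"): always a digit string, so int() never raises
  (PySem.Int.ofStr? (PySem.Int.toStr p.2 ++ PySem.Int.toStr p.1)).getD 0

-- ===== PORT B =====
def true_and_love_test_alt (name : String) : Int :=
  let freq := (PySem.Str.lower name).toList.foldl
    (fun (d : PySem.Dict Char Int) x => d.insert x (d.getD x 0 + 1)) PySem.Dict.empty
  let countTrue := "true".toList.foldl (fun (s : Int) c => s + freq.getD c 0) 0
  let countLove := "love".toList.foldl (fun (s : Int) c => s + freq.getD c 0) 0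
  (PySem.Int.ofStr? (PySem.Int.toStr countTrue ++ PySem.Int.toStr countLove)).getD 0

-- ===== PRECONDITION & SPEC =====
def Spec_true_and_love_test (name : String) (out : Int) : Prop := out = true_and_love_test_alt name
instance (name : String) (out : Int) : Decidable (Spec_true_and_love_test name out) := by unfold Spec_true_and_love_test; infer_instance

-- ===== CLAIM (what is proved, stated in full; the proofs are below) =====
def Claim_equal_true_and_love_test : Prop := ∀ (name : String), Dom_true_and_love_test name → Spec_true_and_love_test name (true_and_love_test name)

-- ===== LEMMAS AND PROOFS =====

-- the inner sum over a fixed nodup character list: "how many of cs equal x" is 0 or 1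
lemma sum_if_eq_of_nodup (cs : List Char) (h : cs.Nodup) (x : Char) :
    (cs.map (fun c => if x == c then (1 : Int) else 0)).sum
      = if cs.contains x then (1 : Int) else 0 := by
  induction cs with
  | nil => simp
  | cons c cs ih =>
    simp only [List.nodup_cons] at h
    by_cases hx : x = c
    · subst hx
      simp only [List.map_cons, List.sum_cons, List.contains_cons]
      have h0 : (cs.map (fun c => if x == c then (1 : Int) else 0)).sum = 0 := by
        rw [ih h.2]
        simp [List.contains_eq_mem, h.1]
      simpa using h0
    · simp only [List.map_cons, List.sum_cons, List.contains_cons]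
      rw [ih h.2]
      simp [hx]

-- countP by membership in a nodup list = sum of per-character counts
lemma countP_contains_eq_sum (cs : List Char) (h : cs.Nodup) (l : List Char) :
    (l.countP (fun i => cs.contains i) : Int)
      = (cs.map (fun c => (l.count c : Int))).sum := by
  induction l with
  | nil => simp
  | cons x l ih =>
    rw [List.countP_cons]
    have hmap : (cs.map (fun c => ((x :: l).count c : Int))).sum
        = (cs.map (fun c => (l.count c : Int))).sum
          + (cs.map (fun c => if x == c then (1 : Int) else 0)).sum := by
      rw [← List.sum_map_add]
      congr 1
      apply List.map_congr_left
      intro c _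
      simp only [List.count_cons, beq_iff_eq]
      by_cases hcx : c = x <;> simp [hcx, eq_comm] <;> push_cast <;> ring
    rw [hmap, ← ih, sum_if_eq_of_nodup cs h x]
    by_cases hc : cs.contains x <;> simp [hc] <;> push_cast <;> ring

-- A's two-counter loop computed in closed form
lemma pairLoop_eq (l : List Char) (a b : Int) :
    l.foldl
      (fun (st : Int × Int) i =>
        let st := if "love".toList.contains i then (st.1 + 1, st.2) else st
        if "true".toList.contains i then (st.1, st.2 + 1) else st) (a, b)
      = (a + (l.countP (fun i => "love".toList.contains i) : Int),
         b + (l.countP (fun i => "true".toList.contains i) : Int)) := by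
  induction l generalizing a b with
  | nil => simp
  | cons x l ih =>
    simp only [List.foldl_cons, List.countP_cons]
    by_cases h1 : "love".toList.contains x <;>
      by_cases h2 : "true".toList.contains x <;>
        · simp only [h1, h2, if_true, if_false, Bool.false_eq_true, ite_true, ite_false, ih]
          refine Prod.ext ?_ ?_ <;> simp <;> push_cast <;> ring

-- B's frequency dict looks up the multiset count
lemma freq_getD (l : List Char) (c : Char) :
    ((l.foldl (fun (d : PySem.Dict Char Int) x => d.insert x (d.getD x 0 + 1))
        PySem.Dict.empty).getD c 0) = (l.count c : Int) := by
  rw [PySem.Dict.getD_foldl_insert_add_one]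
  simp [PySem.Dict.getD, PySem.Dict.empty, PySem.Dict.get?]

lemma sumLoop_eq (cs l : List Char) :
    cs.foldl
      (fun (s : Int) c => s +
        (l.foldl (fun (d : PySem.Dict Char Int) x => d.insert x (d.getD x 0 + 1))
          PySem.Dict.empty).getD c 0) 0
      = (cs.map (fun c => (l.count c : Int))).sum := by
  rw [PySem.List.foldl_add]
  simp only [freq_getD, zero_add]

-- ===== VERDICT (by name: the statement is the Claim_ definition above) =====
theorem true_and_love_test_spec : Claim_equal_true_and_love_test := by
  intro name _
  unfold Spec_true_and_love_test true_and_love_test true_and_love_test_alt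
  simp only [pairLoop_eq, sumLoop_eq, zero_add]
  rw [← countP_contains_eq_sum "true".toList (by decide),
      ← countP_contains_eq_sum "love".toList (by decide)]
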